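-- pv_equiv track=rewrite | github.com/Cvillas91/myPython | codeWars/6kyu.py | anagram_difference
-- ===== SOURCE A (Python) =====
-- def anagram_difference(w1, w2):
--     w1 = list(w1)
--     w2 = list(w2)
--     sum = 0
--     for el in w1:
--         if el in w2:
--             w2.pop(w2.index(el))
--             sum += 1
--     return len(w2) + len(w1) - sum
-- ===== SOURCE B (Python) =====
-- def anagram_difference(w1, w2):
--     l1, l2 = list(w1), list(w2)
--     return sum(abs(l1.count(c) - l2.count(c)) for c in set(l1 + l2))
-- ===== Notes on version B (the rewrite author's own statement) =====
-- stated objective: faster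
-- what changed: Replaces A's destructive greedy matching loop (membership test + index + pop on a shrinking copy of w2) by a per-character count comparison: sum of |w1.count(c) - w2.count(c)| over the distinct characters.
import Mathlib
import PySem

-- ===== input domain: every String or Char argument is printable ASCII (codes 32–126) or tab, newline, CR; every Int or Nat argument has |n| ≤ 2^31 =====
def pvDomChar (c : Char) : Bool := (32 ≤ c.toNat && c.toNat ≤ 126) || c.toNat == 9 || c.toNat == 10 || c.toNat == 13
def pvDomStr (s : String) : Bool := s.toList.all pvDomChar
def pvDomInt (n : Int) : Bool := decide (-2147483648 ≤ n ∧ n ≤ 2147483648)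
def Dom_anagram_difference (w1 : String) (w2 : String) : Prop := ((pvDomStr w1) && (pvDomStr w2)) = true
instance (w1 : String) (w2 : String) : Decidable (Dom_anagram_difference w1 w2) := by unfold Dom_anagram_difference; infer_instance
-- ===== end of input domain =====

-- B replaces A's greedy pop-from-a-copy matching by summing |count differences| per distinct character (idiomatic counting).

-- ===== PORT A =====
-- the for-loop over w1: state is (current w2 copy, sum)
def pvLoopA : List Char → List Char → Int → (List Char × Int)
  | [], w2, s => (w2, s)
  | el :: rest, w2, s =>
    if w2.contains el then
      match PySem.List.index? w2 el with
      | some i =>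
        match PySem.List.pop? w2 (i : Int) with
        | some r => pvLoopA rest r.2 (s + 1)
        | none => pvLoopA rest w2 (s + 1)   -- unreachable: index? returned a valid index
      | none => pvLoopA rest w2 (s + 1)     -- unreachable: guarded by membership
    else pvLoopA rest w2 s

def anagram_difference (w1 : String) (w2 : String) : Int :=
  let l1 := w1.toList
  let l2 := w2.toList
  let r := pvLoopA l1 l2 0
  (r.1.length : Int) + (l1.length : Int) - r.2

-- ===== PORT B =====
def anagram_difference_alt (w1 : String) (w2 : String) : Int :=
  let l1 := w1.toList
  let l2 := w2.toList
  (PySem.Set.ofList (l1 ++ l2)).foldl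
    (fun s c => s + |(l1.count c : Int) - (l2.count c : Int)|) 0

-- ===== PRECONDITION & SPEC =====
def Spec_anagram_difference (w1 : String) (w2 : String) (out : Int) : Prop := out = anagram_difference_alt w1 w2
instance (w1 : String) (w2 : String) (out : Int) : Decidable (Spec_anagram_difference w1 w2 out) := by unfold Spec_anagram_difference; infer_instance

-- ===== CLAIM (what is proved, stated in full; the proofs are below) =====
def Claim_equal_anagram_difference : Prop := ∀ (w1 : String) (w2 : String), Dom_anagram_difference w1 w2 → Spec_anagram_difference w1 w2 (anagram_difference w1 w2)

-- ===== LEMMAS AND PROOFS =====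

-- abstract version of A's loop: number of greedy matches
def pvMatch : List Char → List Char → Nat
  | [], _ => 0
  | a :: t, l2 => if a ∈ l2 then pvMatch t (l2.erase a) + 1 else pvMatch t l2

-- the loop's w2 residue
def pvResid : List Char → List Char → List Char
  | [], l2 => l2
  | a :: t, l2 => if a ∈ l2 then pvResid t (l2.erase a) else pvResid t l2

lemma pvLoopA_eq (l1 : List Char) : ∀ (l2 : List Char) (s : Int),
    pvLoopA l1 l2 s = (pvResid l1 l2, s + pvMatch l1 l2) := by
  induction l1 with
  | nil => intro l2 s; simp [pvLoopA, pvResid, pvMatch]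
  | cons a t ih =>
    intro l2 s
    by_cases h : a ∈ l2
    · rcases Option.isSome_iff_exists.mp ((PySem.List.index?_isSome_iff l2 a).mpr h) with ⟨k, hk⟩
      have hkl : k < l2.length := by
        rcases PySem.List.getElem_of_index?_eq_some hk with ⟨hkl, _, _⟩
        exact hkl
      have hpop : PySem.List.pop? l2 (k : Int) = some (l2[k], l2.eraseIdx k) :=
        PySem.List.pop?_natCast l2 k hkl
      have herase : l2.eraseIdx k = l2.erase a := by
        have hk' : List.idxOf? a l2 = some k := by
          rw [← PySem.List.index?_eq_idxOf?]; exact hk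
        rw [List.erase_eq_eraseIdx, hk']
      simp only [pvLoopA]
      rw [if_pos (by simpa using h), hk]
      simp only [hpop]
      simp only [ih, pvResid, pvMatch, if_pos h, herase]
      simp only [Prod.mk.injEq]
      refine ⟨trivial, ?_⟩
      push_cast
      ring
    · simp only [pvLoopA]
      rw [if_neg (by simpa using h)]
      simp [ih, pvResid, pvMatch, h]

lemma pvMatch_le (l1 : List Char) : ∀ l2 : List Char, pvMatch l1 l2 ≤ l2.length := by
  induction l1 with
  | nil => intro l2; simp [pvMatch]
  | cons a t ih =>
    intro l2
    by_cases h : a ∈ l2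
    · have h1 := ih (l2.erase a)
      have h2 : (l2.erase a).length = l2.length - 1 := List.length_erase_of_mem h
      have h3 : 0 < l2.length := List.length_pos_of_mem h
      simp only [pvMatch, if_pos h]
      omega
    · have h1 := ih l2
      simp only [pvMatch, if_neg h]
      omega

lemma pvResid_length (l1 : List Char) : ∀ l2 : List Char,
    (pvResid l1 l2).length = l2.length - pvMatch l1 l2 := by
  induction l1 with
  | nil => intro l2; simp [pvResid, pvMatch]
  | cons a t ih =>
    intro l2
    by_cases h : a ∈ l2
    · have h1 := ih (l2.erase a)
      have h2 : (l2.erase a).length = l2.length - 1 := List.length_erase_of_mem h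
      have h3 : 0 < l2.length := List.length_pos_of_mem h
      have h4 := pvMatch_le t (l2.erase a)
      simp only [pvResid, pvMatch, if_pos h]
      omega
    · simp only [pvResid, pvMatch, if_neg h]
      exact ih l2

-- greedy matches = card of multiset intersection
lemma inf_cons_of_mem {a : Char} {s t : Multiset Char} (h : a ∈ t) :
    (a ::ₘ s) ⊓ t = a ::ₘ (s ⊓ t.erase a) := by
  ext c
  by_cases hc : c = a
  · subst hc
    have h1 : 1 ≤ t.count c := Multiset.one_le_count_iff_mem.mpr h
    simp [Multiset.inf_eq_inter, Multiset.count_inter, Multiset.count_cons_self, Multiset.count_erase_self]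
    omega
  · simp [Multiset.inf_eq_inter, Multiset.count_inter, Multiset.count_cons_of_ne hc,
      Multiset.count_erase_of_ne hc]

lemma inf_cons_of_not_mem {a : Char} {s t : Multiset Char} (h : a ∉ t) :
    (a ::ₘ s) ⊓ t = s ⊓ t := by
  ext c
  by_cases hc : c = a
  · subst hc
    have h0 : t.count c = 0 := Multiset.count_eq_zero.mpr h
    simp [Multiset.inf_eq_inter, Multiset.count_inter, Multiset.count_cons_self, h0]
  · simp [Multiset.inf_eq_inter, Multiset.count_inter, Multiset.count_cons_of_ne hc]

lemma pvMatch_eq_card_inf (l1 : List Char) : ∀ l2 : List Char,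
    pvMatch l1 l2 = Multiset.card ((l1 : Multiset Char) ⊓ (l2 : Multiset Char)) := by
  induction l1 with
  | nil => intro l2; simp [pvMatch]
  | cons a t ih =>
    intro l2
    by_cases h : a ∈ l2
    · have := ih (l2.erase a)
      have hmul : ((l2.erase a : List Char) : Multiset Char) = (l2 : Multiset Char).erase a := by
        simp
      rw [pvMatch, if_pos h, this, hmul]
      have : ((a :: t : List Char) : Multiset Char) = a ::ₘ (t : Multiset Char) := by simp
      rw [this, inf_cons_of_mem (by simpa using h)]
      simp
    · rw [pvMatch, if_neg h, ih]
      have : ((a :: t : List Char) : Multiset Char) = a ::ₘ (t : Multiset Char) := by simp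
      rw [this, inf_cons_of_not_mem (by simpa using h)]

-- B's foldl as a Finset sum over the distinct characters
lemma foldl_abs_sum (l : List Char) (f : Char → Int) :
    l.foldl (fun s c => s + f c) 0 = (l.map f).sum := by
  have h : ∀ (init : Int), l.foldl (fun s c => s + f c) init = init + (l.map f).sum := by
    induction l with
    | nil => intro init; simp
    | cons a t ih => intro init; simp [List.foldl_cons, ih]; ring
  simpa using h 0

lemma toFinset_pv_dedup (l : List Char) : (PySem.List.dedup l).toFinset = l.toFinset := by
  ext c
  simp [List.mem_toFinset]

-- main bridging identity
lemma main_eq (l1 l2 : List Char) :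
    ((l2.length : Int) - pvMatch l1 l2) + (l1.length : Int) - pvMatch l1 l2 =
    (PySem.Set.ofList (l1 ++ l2)).foldl
      (fun s c => s + |(l1.count c : Int) - (l2.count c : Int)|) 0 := by
  have hset : PySem.Set.ofList (l1 ++ l2) = PySem.List.dedup (l1 ++ l2) := by
    simp
  rw [hset, foldl_abs_sum]
  set S : Finset Char := (l1 ++ l2).toFinset with hS
  have hnodup : (PySem.List.dedup (l1 ++ l2)).Nodup := PySem.List.nodup_dedup _
  have hsum : ((PySem.List.dedup (l1 ++ l2)).map
      (fun c => |(l1.count c : Int) - (l2.count c : Int)|)).sum =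
      ∑ c ∈ S, |(l1.count c : Int) - (l2.count c : Int)| := by
    rw [← List.sum_toFinset _ hnodup, toFinset_pv_dedup]
  rw [hsum]
  -- lengths and match as sums over S
  have hlen1 : (l1.length : Int) = ∑ c ∈ S, (l1.count c : Int) := by
    have h1 : ∑ c ∈ (l1 : Multiset Char).toFinset, (l1 : Multiset Char).count c = l1.length := by
      simpa using Multiset.toFinset_sum_count_eq (l1 : Multiset Char)
    have hsub : (l1 : Multiset Char).toFinset ⊆ S := by
      intro c hc
      simp only [hS, List.mem_toFinset, List.mem_append]
      exact Or.inl (by simpa using hc)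
    have h2 : ∑ c ∈ S, (l1 : Multiset Char).count c = l1.length := by
      rw [← h1]
      exact (Finset.sum_subset hsub (fun c _ hc =>
        Multiset.count_eq_zero.mpr (fun hmem =>
          hc (List.mem_toFinset.mpr (by simpa using hmem))))).symm
    calc (l1.length : Int) = ((∑ c ∈ S, (l1 : Multiset Char).count c : Nat) : Int) := by rw [h2]
      _ = ∑ c ∈ S, (l1.count c : Int) := by push_cast [Multiset.coe_count]; rfl
  have hlen2 : (l2.length : Int) = ∑ c ∈ S, (l2.count c : Int) := by
    have h1 : ∑ c ∈ (l2 : Multiset Char).toFinset, (l2 : Multiset Char).count c = l2.length := by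
      simpa using Multiset.toFinset_sum_count_eq (l2 : Multiset Char)
    have hsub : (l2 : Multiset Char).toFinset ⊆ S := by
      intro c hc
      simp only [hS, List.mem_toFinset, List.mem_append]
      exact Or.inr (by simpa using hc)
    have h2 : ∑ c ∈ S, (l2 : Multiset Char).count c = l2.length := by
      rw [← h1]
      exact (Finset.sum_subset hsub (fun c _ hc =>
        Multiset.count_eq_zero.mpr (fun hmem =>
          hc (List.mem_toFinset.mpr (by simpa using hmem))))).symm
    calc (l2.length : Int) = ((∑ c ∈ S, (l2 : Multiset Char).count c : Nat) : Int) := by rw [h2]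
      _ = ∑ c ∈ S, (l2.count c : Int) := by push_cast [Multiset.coe_count]; rfl
  have hmatch : (pvMatch l1 l2 : Int) = ∑ c ∈ S, (min (l1.count c) (l2.count c) : Int) := by
    rw [pvMatch_eq_card_inf]
    set m := (l1 : Multiset Char) ⊓ (l2 : Multiset Char) with hm
    have h1 : ∑ c ∈ m.toFinset, m.count c = Multiset.card m := Multiset.toFinset_sum_count_eq m
    have hsub : m.toFinset ⊆ S := by
      intro c hc
      have hcm : c ∈ m := Multiset.mem_toFinset.mp hc
      have h1 : c ∈ (l1 : Multiset Char) := Multiset.mem_of_le inf_le_left hcm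
      simp only [hS, List.mem_toFinset, List.mem_append]
      exact Or.inl (by simpa using h1)
    have h2 : ∑ c ∈ S, m.count c = Multiset.card m := by
      rw [← h1]
      exact (Finset.sum_subset hsub (fun c _ hc =>
        Multiset.count_eq_zero.mpr (fun hmem =>
          hc (Multiset.mem_toFinset.mpr hmem)))).symm
    have hcount : ∀ c, m.count c = min (l1.count c) (l2.count c) := by
      intro c
      simp [hm, Multiset.inf_eq_inter, Multiset.coe_count]
    calc (Multiset.card m : Int) = ((∑ c ∈ S, m.count c : Nat) : Int) := by rw [h2]
      _ = ∑ c ∈ S, (min (l1.count c) (l2.count c) : Int) := by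
          push_cast [hcount]; rfl
  have hpt : ∑ c ∈ S, |(l1.count c : Int) - (l2.count c : Int)| =
      ∑ c ∈ S, ((l1.count c : Int) + (l2.count c : Int)
        - 2 * (min (l1.count c) (l2.count c) : Int)) := by
    apply Finset.sum_congr rfl
    intro c _
    rcases le_total (l1.count c) (l2.count c) with hle | hle
    · rw [min_eq_left (show ((l1.count c : Int)) ≤ (l2.count c : Int) from by exact_mod_cast hle),
        abs_of_nonpos (by omega)]
      ring
    · rw [min_eq_right (show ((l2.count c : Int)) ≤ (l1.count c : Int) from by exact_mod_cast hle),
        abs_of_nonneg (by omega)]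
      ring
  rw [hpt, Finset.sum_sub_distrib, Finset.sum_add_distrib, ← Finset.mul_sum,
    ← hlen1, ← hlen2, ← hmatch]
  ring
-- ===== VERDICT (by name: the statement is the Claim_ definition above) =====
theorem anagram_difference_spec : Claim_equal_anagram_difference := by
  intro w1 w2 _
  unfold Spec_anagram_difference anagram_difference anagram_difference_alt
  simp only [pvLoopA_eq, zero_add]
  have hle := pvMatch_le w1.toList w2.toList
  have hres := pvResid_length w1.toList w2.toList
  have hmain := main_eq w1.toList w2.toList
  rw [hres]
  have hcast : ((w2.toList.length - pvMatch w1.toList w2.toList : Nat) : Int)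
      = (w2.toList.length : Int) - pvMatch w1.toList w2.toList := by omega
  rw [hcast]
  linarith [hmain]
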